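-- pv_equiv track=rewrite | github.com/k123321141/ADLxMLDS2017 | scripts/mapping.py | trim_arr
-- ===== SOURCE A (Python) =====
-- def trim_arr(arr):
--     #trim sil
--     for i in range(len(arr)):
--         a = arr[i]
--         if a != 'sil':
--             start_index = i
--             break
--     arr = arr[start_index:]
--
--     for i in range(len(arr)-1,-1,-1):
--         a = arr[i]
--         if a != 'sil':
--             end_index = i
--             break
--     arr = arr[:end_index+1]
--
--     #remove repeat
--     pre = 'start'
--     for i in range(len(arr)):
--         a = arr[i]
--         if a == pre:
--             arr[i] = 'repeat'
--         else:
--             pre = a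
--     #
--     result = []
--     for a in arr:
--         if a != 'repeat':
--             result.append(a)
--     return result
-- ===== SOURCE B (Python) =====
-- def trim_arr(arr):
--     first = 0
--     while first < len(arr) and arr[first] == 'sil':
--         first += 1
--     last = len(arr) - 1
--     while last >= 0 and arr[last] == 'sil':
--         last -= 1
--     result = []
--     for a in arr[first:last + 1]:
--         if not result or a != result[-1]:
--             result.append(a)
--     return result
-- ===== Notes on version B (the rewrite author's own statement) =====
-- stated objective: simpler
-- what changed: B replaces A's mark-duplicates-as-'repeat' pass plus filter pass (and its 'start'/'repeat' sentinel strings) by a single sentinel-free pass that appends an element only when it differs from the last kept one; trimming stays two index scans; Pre_ excludes empty/all-'sil' inputs, on which A raises UnboundLocalError.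
-- intended difference: On inputs containing a literal 'repeat' element, or whose first non-'sil' element is 'start', A's sentinels collide with the data and A silently drops those elements from its result; B keeps them like any other value, which is the intended trim-and-collapse behaviour. — e.g. on trim_arr(["start", "a"]): A returns ["a"], B returns ["start", "a"]
import Mathlib
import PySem

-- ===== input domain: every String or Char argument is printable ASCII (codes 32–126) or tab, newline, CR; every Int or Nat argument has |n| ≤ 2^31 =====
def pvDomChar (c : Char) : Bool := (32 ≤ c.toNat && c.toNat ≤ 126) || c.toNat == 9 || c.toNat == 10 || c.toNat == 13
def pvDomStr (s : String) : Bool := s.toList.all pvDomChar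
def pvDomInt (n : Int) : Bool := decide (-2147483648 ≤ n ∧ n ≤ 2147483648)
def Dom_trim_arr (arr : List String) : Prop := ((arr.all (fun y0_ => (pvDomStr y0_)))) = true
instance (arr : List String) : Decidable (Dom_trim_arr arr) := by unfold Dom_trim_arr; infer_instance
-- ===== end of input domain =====

-- B trims the boundary 'sil' runs with two index scans and collapses duplicate runs in ONE
-- pass with no sentinel values, replacing A's mark-as-'repeat' pass plus filter pass; B
-- intentionally differs where A's sentinels collide with the data (see D_trim_arr).

-- ===== PORT A =====
-- for i in range(len(arr)): a = arr[i]; if a != 'sil': start_index = i; break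
-- (returns none when the loop finishes without break, i.e. start_index stays unbound)
def trimA_findStart : List String → Nat → Option Nat
  | [], _ => none
  | a :: rest, i => if a ≠ "sil" then some i else trimA_findStart rest (i + 1)

-- for i in range(len(arr)-1,-1,-1): a = arr[i]; if a != 'sil': end_index = i; break
-- (argument is the current index i, stepped down to 0; none = end_index stays unbound)
def trimA_findEnd (arr : List String) : Nat → Option Nat
  | 0 => if arr.getD 0 "" ≠ "sil" then some 0 else none
  | i + 1 => if arr.getD (i + 1) "" ≠ "sil" then some (i + 1) else trimA_findEnd arr i

-- pre = 'start'; for i in range(len(arr)): if arr[i] == pre: arr[i] = 'repeat' else: pre = arr[i]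
def trimA_mark : String → List String → List String
  | _, [] => []
  | pre, a :: rest => if a = pre then "repeat" :: trimA_mark pre rest else a :: trimA_mark a rest

def trim_arr (arr : List String) : List String :=
  match trimA_findStart arr 0 with
  | none => []          -- Python: UnboundLocalError (outside Pre_trim_arr)
  | some s =>
    let arr1 := arr.drop s                     -- arr = arr[start_index:]
    match trimA_findEnd arr1 (arr1.length - 1) with
    | none => []        -- Python: UnboundLocalError (unreachable once start_index was found)
    | some e =>
      let arr2 := arr1.take (e + 1)            -- arr = arr[:end_index+1]
      (trimA_mark "start" arr2).filter (fun a => a ≠ "repeat")   -- result = [a for a in arr if a != 'repeat']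

-- ===== PORT B =====
-- while first < len(arr) and arr[first] == 'sil': first += 1
-- (structural recursion on the number of remaining indices, len(arr) - first)
def altFirstAux (arr : List String) : Nat → Nat → Nat
  | i, 0 => i
  | i, n + 1 => if arr.getD i "" = "sil" then altFirstAux arr (i + 1) n else i

def altFirst (arr : List String) (i : Nat) : Nat := altFirstAux arr i (arr.length - i)

-- while last >= 0 and arr[last] == 'sil': last -= 1   (argument / result is last+1)
def altLast (arr : List String) : Nat → Nat
  | 0 => 0
  | j + 1 => if arr.getD j "" = "sil" then altLast arr j else j + 1

def trim_arr_alt (arr : List String) : List String :=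
  let first := altFirst arr 0
  let last1 := altLast arr arr.length
  -- result = []; for a in arr[first:last+1]: if not result or a != result[-1]: result.append(a)
  ((arr.drop first).take (last1 - first)).foldl
    (fun result a => if result.getLast? = some a then result else result ++ [a]) []

-- ===== PRECONDITION & SPEC =====
-- Pre_ excludes exactly the inputs with no non-'sil' element (empty or all-'sil'),
-- on which A raises UnboundLocalError.
def Pre_trim_arr (arr : List String) : Prop := ∃ a ∈ arr, a ≠ "sil"
instance (arr : List String) : Decidable (Pre_trim_arr arr) := by unfold Pre_trim_arr; infer_instance

def pvWitness_trim_arr : List String := ["sil", "ab", "ab", "c", "sil"]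

-- On inputs containing a literal 'repeat' element, A silently drops every such element, and
-- when the first non-'sil' element is 'start', A drops that leading run too (its 'pre'/'repeat'
-- sentinels collide with the data); B keeps these elements like any other, which is the
-- intended trim-and-collapse behaviour.
def D_trim_arr (arr : List String) : Prop :=
  "repeat" ∈ arr ∨ (arr.dropWhile (fun x => x == "sil")).head? = some "start"
instance (arr : List String) : Decidable (D_trim_arr arr) := by unfold D_trim_arr; infer_instance

def Spec_trim_arr (arr : List String) (out : List String) : Prop := ¬ D_trim_arr arr → out = trim_arr_alt arr
instance (arr : List String) (out : List String) : Decidable (Spec_trim_arr arr out) := by unfold Spec_trim_arr; infer_instance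

def pvDiffWitness_trim_arr : List String := ["start", "a"]
def pvDiffWitnessOut_trim_arr : (List String) × (List String) := (["a"], ["start", "a"])

-- ===== CLAIM (what is proved, stated in full; the proofs are below) =====
def Claim_unchanged_trim_arr : Prop := ∀ (arr : List String), Dom_trim_arr arr → Pre_trim_arr arr → Spec_trim_arr arr (trim_arr arr)
def Claim_changed_trim_arr : Prop := Dom_trim_arr (pvDiffWitness_trim_arr) ∧ Pre_trim_arr (pvDiffWitness_trim_arr) ∧ D_trim_arr (pvDiffWitness_trim_arr) ∧ trim_arr (pvDiffWitness_trim_arr) = pvDiffWitnessOut_trim_arr.1 ∧ trim_arr_alt (pvDiffWitness_trim_arr) = pvDiffWitnessOut_trim_arr.2 ∧ pvDiffWitnessOut_trim_arr.1 ≠ pvDiffWitnessOut_trim_arr.2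
def Claim_exact_trim_arr : Prop := ∀ (arr : List String), Dom_trim_arr arr → Pre_trim_arr arr → D_trim_arr arr → trim_arr arr ≠ trim_arr_alt arr

-- ===== LEMMAS AND PROOFS =====

-- proof-side spine: adjacent-duplicate collapse relative to the previously kept key
def dedupFrom : Option String → List String → List String
  | _, [] => []
  | p, a :: r => if p = some a then dedupFrom p r else a :: dedupFrom (some a) r

theorem foldl_dedup (l : List String) : ∀ (ks : List String),
    l.foldl (fun ks a => if ks.getLast? = some a then ks else ks ++ [a]) ks
      = ks ++ dedupFrom ks.getLast? l := by
  induction l with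
  | nil => intro ks; simp [dedupFrom]
  | cons a r ih =>
    intro ks
    by_cases h : ks.getLast? = some a
    · rw [List.foldl_cons, if_pos h, ih ks]
      simp only [dedupFrom]
      rw [if_pos h]
    · rw [List.foldl_cons, if_neg h, ih (ks ++ [a]), List.getLast?_concat]
      simp only [dedupFrom]
      rw [if_neg h]
      simp

theorem findStart_eq (l : List String) : ∀ (i : Nat),
    trimA_findStart l i =
      if l.dropWhile (fun a => a == "sil") = [] then none
      else some (i + (l.takeWhile (fun a => a == "sil")).length) := by
  induction l with
  | nil => intro i; simp [trimA_findStart]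
  | cons a r ih =>
    intro i
    by_cases h : a = "sil"
    · subst h
      simp only [trimA_findStart, ne_eq, not_true_eq_false, if_false, ih (i + 1),
        List.dropWhile_cons, List.takeWhile_cons]
      simp only [BEq.rfl, if_true, reduceIte]
      split
      · rfl
      · simp only [List.length_cons]; congr 1; omega
    · simp only [trimA_findStart, ne_eq, h, not_false_eq_true, if_true,
        List.dropWhile_cons, List.takeWhile_cons]
      have hb' : (a == "sil") = false := by simp [beq_iff_eq, h]
      simp [hb', List.cons_ne_nil]

theorem findEnd_eq (t q : List String) (ht : t ≠ []) (hl : t.getLast? ≠ some "sil")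
    (hq : ∀ x ∈ q, x = "sil") :
    ∀ i, t.length - 1 ≤ i → i < t.length + q.length →
      trimA_findEnd (t ++ q) i = some (t.length - 1) := by
  have htpos : 0 < t.length := List.length_pos_of_ne_nil ht
  have hgl : t.getLast? = t[t.length - 1]? := List.getLast?_eq_getElem?
  intro i
  induction i with
  | zero =>
    intro h1 _
    have hlen : t.length = 1 := by omega
    have h0lt : 0 < t.length := by omega
    have h0 : (t ++ q).getD 0 "" = t.getD 0 "" := by
      simp only [List.getD_eq_getElem?_getD]
      rw [List.getElem?_append_left h0lt]
    have hc' : t.getD 0 "" = t[0] := by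
      simp [List.getD_eq_getElem?_getD, List.getElem?_eq_getElem h0lt]
    have hget : t.getD 0 "" ≠ "sil" := by
      intro hc
      apply hl
      rw [hgl, hlen]
      show t[0]? = some "sil"
      rw [List.getElem?_eq_getElem h0lt, ← hc', hc]
    simp only [trimA_findEnd]
    rw [if_pos (by rw [h0]; exact hget)]
    simp [hlen]
  | succ j ih =>
    intro h1 h2
    rcases Nat.lt_or_ge (j + 1) t.length with hlt | hge
    · have hj : j + 1 = t.length - 1 := by omega
      have h0 : (t ++ q).getD (j + 1) "" = t.getD (j + 1) "" := by
        simp only [List.getD_eq_getElem?_getD]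
        rw [List.getElem?_append_left hlt]
      have hc' : t.getD (j + 1) "" = t[j + 1] := by
        simp [List.getD_eq_getElem?_getD, List.getElem?_eq_getElem hlt]
      have hget : t.getD (j + 1) "" ≠ "sil" := by
        intro hc
        apply hl
        rw [hgl, ← hj]
        rw [List.getElem?_eq_getElem hlt, ← hc', hc]
      simp only [trimA_findEnd]
      rw [if_pos (by rw [h0]; exact hget), hj]
    · have hk : j + 1 - t.length < q.length := by omega
      have h0 : (t ++ q).getD (j + 1) "" = "sil" := by
        simp only [List.getD_eq_getElem?_getD]
        rw [List.getElem?_append_right hge, List.getElem?_eq_getElem hk]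
        exact hq _ (List.getElem_mem hk)
      simp only [trimA_findEnd]
      rw [if_neg (by rw [h0]; simp)]
      exact ih (by omega) (by omega)

theorem mark_filter (l : List String) : ∀ (pre : String),
    (trimA_mark pre l).filter (fun a => a ≠ "repeat")
      = (dedupFrom (some pre) l).filter (fun a => a ≠ "repeat") := by
  induction l with
  | nil => intro pre; rfl
  | cons a r ih =>
    intro pre
    by_cases h : a = pre
    · subst h
      simp only [trimA_mark, if_pos rfl, dedupFrom, if_pos rfl, List.filter_cons]
      simp only [ne_eq, not_true_eq_false, decide_false, reduceIte]
      exact ih a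
    · have h' : ¬ (some pre = some a) := fun hh => h (Option.some.inj hh).symm
      simp only [trimA_mark, if_neg h, dedupFrom, if_neg h', List.filter_cons]
      rw [ih a]

theorem head_dropWhile_ne (l : List String) : ∀ (a : String),
    (l.dropWhile (fun x => x == "sil")).head? = some a → a ≠ "sil" := by
  induction l with
  | nil => intro a h; simp at h
  | cons c l' ih =>
    intro a h
    by_cases hc : c = "sil"
    · subst hc
      rw [List.dropWhile_cons] at h
      simp only [BEq.rfl, if_true, reduceIte] at h
      exact ih a h
    · rw [List.dropWhile_cons] at h
      have : ((c == "sil") = false) := by simp [beq_iff_eq, hc]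
      simp [this] at h
      rw [← h.symm] at hc
      exact fun hh => hc (by rw [hh])

theorem trimA_eval (arr : List String) (s e : Nat)
    (hfs : trimA_findStart arr 0 = some s)
    (hfe : trimA_findEnd (arr.drop s) ((arr.drop s).length - 1) = some e) :
    trim_arr arr = (trimA_mark "start" ((arr.drop s).take (e + 1))).filter (fun a => a ≠ "repeat") := by
  unfold trim_arr
  simp only [hfs]
  simp only [hfe]

theorem altFirstAux_eq (arr : List String) : ∀ (n i : Nat), arr.length - i = n → i ≤ arr.length →
    altFirstAux arr i n = i + (((arr.drop i).takeWhile (fun x => x == "sil")).length) := by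
  intro n
  induction n with
  | zero =>
    intro i hn hle
    have : i = arr.length := by omega
    subst this
    simp [altFirstAux]
  | succ n ih =>
    intro i hn hle
    have hlt : i < arr.length := by omega
    have hdrop : arr.drop i = arr[i] :: arr.drop (i + 1) :=
      List.drop_eq_getElem_cons hlt
    have hgd : arr.getD i "" = arr[i] := by
      simp [List.getD_eq_getElem?_getD, List.getElem?_eq_getElem hlt]
    simp only [altFirstAux, hgd]
    by_cases h : arr[i] = "sil"
    · rw [if_pos h, ih (i + 1) (by omega) (by omega), hdrop, List.takeWhile_cons]
      have hb : (arr[i] == "sil") = true := by simp [h]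
      simp only [hb, if_true, List.length_cons]
      omega
    · rw [if_neg h, hdrop, List.takeWhile_cons]
      have hb : (arr[i] == "sil") = false := by simp [h]
      simp [hb]

theorem altFirst_eq (arr : List String) (i : Nat) (hle : i ≤ arr.length) :
    altFirst arr i = i + (((arr.drop i).takeWhile (fun x => x == "sil")).length) :=
  altFirstAux_eq arr (arr.length - i) i rfl hle

theorem altLast_eq (t q : List String) (ht : t ≠ []) (hl : t.getLast? ≠ some "sil")
    (hq : ∀ x ∈ q, x = "sil") :
    ∀ j, t.length ≤ j → j ≤ t.length + q.length → altLast (t ++ q) j = t.length := by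
  have htpos : 0 < t.length := List.length_pos_of_ne_nil ht
  have hgl : t.getLast? = t[t.length - 1]? := List.getLast?_eq_getElem?
  intro j
  induction j with
  | zero => intro h1 _; omega
  | succ j ih =>
    intro h1 h2
    rcases Nat.lt_or_ge j t.length with hlt | hge
    · have hj : j = t.length - 1 := by omega
      have h0 : (t ++ q).getD j "" = t.getD j "" := by
        simp only [List.getD_eq_getElem?_getD]
        rw [List.getElem?_append_left hlt]
      have hc' : t.getD j "" = t[j] := by
        simp [List.getD_eq_getElem?_getD, List.getElem?_eq_getElem hlt]
      have hget : t.getD j "" ≠ "sil" := by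
        intro hc
        apply hl
        rw [hgl, ← hj, List.getElem?_eq_getElem hlt, ← hc', hc]
      simp only [altLast]
      rw [if_neg (by rw [h0]; exact hget)]
      omega
    · have hk : j - t.length < q.length := by omega
      have h0 : (t ++ q).getD j "" = "sil" := by
        simp only [List.getD_eq_getElem?_getD]
        rw [List.getElem?_append_right hge, List.getElem?_eq_getElem hk]
        exact hq _ (List.getElem_mem hk)
      simp only [altLast]
      rw [if_pos h0]
      exact ih (by omega) (by omega)

theorem dedup_subset (l : List String) : ∀ (p : Option String) (x : String),
    x ∈ dedupFrom p l → x ∈ l := by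
  induction l with
  | nil => intro p x h; simp [dedupFrom] at h
  | cons a r ih =>
    intro p x h
    by_cases hp : p = some a
    · simp only [dedupFrom, if_pos hp] at h
      exact List.mem_cons_of_mem a (ih p x h)
    · simp only [dedupFrom, if_neg hp] at h
      rcases List.mem_cons.mp h with h1 | h1
      · exact h1 ▸ List.mem_cons_self
      · exact List.mem_cons_of_mem a (ih (some a) x h1)

theorem mem_dedup (l : List String) : ∀ (p : Option String) (x : String), x ∈ l →
    x ∈ dedupFrom p l ∨ p = some x := by
  induction l with
  | nil => intro p x h; simp at h
  | cons a r ih =>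
    intro p x h
    by_cases hp : p = some a
    · simp only [dedupFrom, if_pos hp]
      rcases List.mem_cons.mp h with h1 | h1
      · right; rw [hp, h1]
      · exact ih p x h1
    · simp only [dedupFrom, if_neg hp]
      rcases List.mem_cons.mp h with h1 | h1
      · left; exact h1 ▸ List.mem_cons_self
      · rcases ih (some a) x h1 with h2 | h2
        · left; exact List.mem_cons_of_mem a h2
        · left; rw [← Option.some.inj h2]; exact List.mem_cons_self

theorem head_dedup_ne (l : List String) : ∀ (x : String),
    (dedupFrom (some x) l).head? ≠ some x := by
  induction l with
  | nil => intro x; simp [dedupFrom]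
  | cons a r ih =>
    intro x
    by_cases hp : (some x : Option String) = some a
    · simp only [dedupFrom, if_pos hp]
      exact ih x
    · simp only [dedupFrom, if_neg hp, List.head?_cons]
      exact fun hc => hp (by rw [Option.some.inj hc])

-- Characterisation: under Pre_, both ports are the stated functions of the trimmed slice tr.
theorem AB_char (arr : List String) (hpre : Pre_trim_arr arr) :
    ∃ tr : List String, tr ≠ [] ∧
      tr.head? = (arr.dropWhile (fun x => x == "sil")).head? ∧
      (∀ x ∈ tr, x ∈ arr) ∧
      ("repeat" ∈ arr → "repeat" ∈ tr) ∧
      trim_arr arr = (dedupFrom (some "start") tr).filter (fun a => a ≠ "repeat") ∧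
      trim_arr_alt arr = dedupFrom none tr := by
  unfold Pre_trim_arr at hpre
  obtain ⟨w, hw, hwne⟩ := hpre
  obtain ⟨p, a1, hparr, hp_sil, hpd, ha1d⟩ :
      ∃ p a1, arr = p ++ a1 ∧ (∀ x ∈ p, x = "sil")
        ∧ p = arr.takeWhile (fun x => x == "sil") ∧ a1 = arr.dropWhile (fun x => x == "sil") :=
    ⟨_, _, (List.takeWhile_append_dropWhile).symm,
      fun x hx => by simpa using List.mem_takeWhile_imp hx, rfl, rfl⟩
  have hw1 : w ∈ a1 := by
    rcases List.mem_append.mp (by rw [← hparr]; exact hw) with hmem | hmem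
    · exact absurd (hp_sil w hmem) hwne
    · exact hmem
  have ha1ne : a1 ≠ [] := List.ne_nil_of_mem hw1
  obtain ⟨h0, a1t, ha1c⟩ : ∃ x xs, a1 = x :: xs := List.exists_cons_of_ne_nil ha1ne
  have hh : h0 ≠ "sil" := head_dropWhile_ne arr h0 (by rw [← ha1d, ha1c]; rfl)
  obtain ⟨t', q', hr1, hq'_sil, ht'd⟩ :
      ∃ t' q', a1.reverse = q' ++ t' ∧ (∀ x ∈ q', x = "sil")
        ∧ t' = a1.reverse.dropWhile (fun x => x == "sil") :=
    ⟨_, _, (List.takeWhile_append_dropWhile).symm,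
      fun x hx => by simpa using List.mem_takeWhile_imp hx, rfl⟩
  have hh_mem_r : h0 ∈ a1.reverse := List.mem_reverse.mpr (by rw [ha1c]; simp)
  have ht'ne : t' ≠ [] := by
    intro hc
    rw [hc, List.append_nil] at hr1
    have : h0 ∈ q' := by rw [← hr1]; exact hh_mem_r
    exact hh (hq'_sil h0 this)
  obtain ⟨th, t't, ht'c⟩ : ∃ x xs, t' = x :: xs := List.exists_cons_of_ne_nil ht'ne
  have hth : th ≠ "sil" := head_dropWhile_ne a1.reverse th (by rw [← ht'd, ht'c]; rfl)
  have ha1tq : a1 = t'.reverse ++ q'.reverse := by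
    have hrev := congrArg List.reverse hr1
    rw [List.reverse_reverse, List.reverse_append] at hrev
    exact hrev
  have hq_sil : ∀ x ∈ q'.reverse, x = "sil" := fun x hx => hq'_sil x (List.mem_reverse.mp hx)
  have htne : t'.reverse ≠ [] := by simp [ht'c]
  have htlast : (t'.reverse).getLast? = some th := by rw [List.getLast?_reverse, ht'c]; rfl
  have htlast' : (t'.reverse).getLast? ≠ some "sil" := by
    rw [htlast]
    exact fun hc => hth (Option.some.inj hc)
  refine ⟨t'.reverse, htne, ?_, ?_, ?_, ?_, ?_⟩
  · -- head of tr = head of dropWhile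
    rw [← ha1d, ha1tq]
    exact (List.head?_append_of_ne_nil _ htne).symm
  · intro x hx
    rw [hparr, ha1tq]
    exact List.mem_append.mpr (Or.inr (List.mem_append.mpr (Or.inl hx)))
  · -- repeat ∈ arr → repeat ∈ tr
    intro hr
    rw [hparr, ha1tq] at hr
    rcases List.mem_append.mp hr with h1 | h1
    · exact absurd (hp_sil _ h1) (by decide)
    · rcases List.mem_append.mp h1 with h2 | h2
      · exact h2
      · exact absurd (hq_sil _ h2) (by decide)
  · -- A side
    have hfs : trimA_findStart arr 0 = some p.length := by
      rw [findStart_eq]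
      rw [if_neg (by rw [← ha1d]; exact ha1ne)]
      rw [hpd]
      simp
    have hdrop : arr.drop p.length = a1 := by
      rw [hparr]
      exact List.drop_left
    have htpos : 0 < t'.reverse.length := List.length_pos_of_ne_nil htne
    have hfe' : trimA_findEnd (arr.drop p.length) ((arr.drop p.length).length - 1)
        = some (t'.reverse.length - 1) := by
      rw [hdrop, ha1tq]
      exact findEnd_eq t'.reverse q'.reverse htne htlast' hq_sil _
        (by simp only [List.length_append]; omega)
        (by simp only [List.length_append]; omega)
    have htake : (arr.drop p.length).take (t'.reverse.length - 1 + 1) = t'.reverse := by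
      rw [hdrop, ha1tq, show t'.reverse.length - 1 + 1 = t'.reverse.length from by omega]
      exact List.take_left
    have hA := trimA_eval arr p.length (t'.reverse.length - 1) hfs hfe'
    rw [htake] at hA
    rw [hA, mark_filter]
  · -- B side
    have hfirst : altFirst arr 0 = p.length := by
      rw [altFirst_eq arr 0 (by omega)]
      simp only [List.drop_zero, Nat.zero_add, ← hpd]
    have harr : arr = (p ++ t'.reverse) ++ q'.reverse := by
      rw [hparr, ha1tq, List.append_assoc]
    have hptne : p ++ t'.reverse ≠ [] := by
      intro hc
      exact htne (List.append_eq_nil_iff.mp hc).2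
    have hptlast : (p ++ t'.reverse).getLast? ≠ some "sil" := by
      rw [List.getLast?_append_of_ne_nil p htne]
      exact htlast'
    have hlast1 : altLast arr arr.length = p.length + t'.reverse.length := by
      have := altLast_eq (p ++ t'.reverse) q'.reverse hptne hptlast hq_sil
        arr.length (by rw [harr]; simp) (by rw [harr]; simp [List.length_append]; omega)
      rw [← harr] at this
      rw [this]
      simp
    unfold trim_arr_alt
    simp only [hfirst, hlast1, Nat.add_sub_cancel_left]
    have hdrop : arr.drop p.length = t'.reverse ++ q'.reverse := by
      rw [hparr]
      rw [List.drop_left, ha1tq]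
    rw [hdrop, List.take_left, foldl_dedup]
    simp

-- ===== VERDICT (by name: the statements are the Claim_ definitions above) =====
theorem trim_arr_spec : Claim_unchanged_trim_arr := by
  intro arr _ hpre hnd
  obtain ⟨tr, htrne, hhead, hsub, _, hA, hB⟩ := AB_char arr hpre
  unfold D_trim_arr at hnd
  have hnr : "repeat" ∉ arr := fun h => hnd (Or.inl h)
  have hns : ¬ (arr.dropWhile (fun x => x == "sil")).head? = some "start" := fun h => hnd (Or.inr h)
  obtain ⟨h0, tt, rfl⟩ : ∃ x xs, tr = x :: xs := List.exists_cons_of_ne_nil htrne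
  have hh0 : h0 ≠ "start" := by
    intro hc
    exact hns (by rw [← hhead, hc]; rfl)
  have hded : dedupFrom (some "start") (h0 :: tt) = dedupFrom none (h0 :: tt) := by
    simp only [dedupFrom]
    rw [if_neg (fun hc => hh0 (Option.some.inj hc).symm), if_neg (by simp)]
  have hfilter : (dedupFrom (some "start") (h0 :: tt)).filter (fun a => a ≠ "repeat")
      = dedupFrom (some "start") (h0 :: tt) := by
    apply List.filter_eq_self.mpr
    intro x hx
    have hxarr : x ∈ arr := hsub x (dedup_subset _ _ _ hx)
    have : x ≠ "repeat" := fun hc => hnr (hc ▸ hxarr)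
    simpa using this
  rw [hA, hfilter, hded, hB]

theorem trim_arr_changed : Claim_changed_trim_arr := by
  unfold Claim_changed_trim_arr; decide

theorem trim_arr_tight : Claim_exact_trim_arr := by
  intro arr _ hpre hd heq
  obtain ⟨tr, htrne, hhead, hsub, hrep, hA, hB⟩ := AB_char arr hpre
  by_cases hr : "repeat" ∈ arr
  · -- 'repeat' ∈ arr: B's output contains it, A's never does
    have hrtr : "repeat" ∈ tr := hrep hr
    have hrB : "repeat" ∈ trim_arr_alt arr := by
      rw [hB]
      rcases mem_dedup tr none "repeat" hrtr with h1 | h1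
      · exact h1
      · exact absurd h1 (by simp)
    rw [← heq, hA] at hrB
    have := List.of_mem_filter hrB
    simp at this
  · -- first non-'sil' element is 'start': head of B is 'start', head of A is not
    have hs : (arr.dropWhile (fun x => x == "sil")).head? = some "start" := by
      unfold D_trim_arr at hd
      tauto
    obtain ⟨h0, tt, rfl⟩ : ∃ x xs, tr = x :: xs := List.exists_cons_of_ne_nil htrne
    have hh0 : h0 = "start" := by
      have hso : (h0 :: tt).head? = some "start" := by rw [hhead]; exact hs
      exact Option.some.inj hso
    subst hh0
    have hBhead : (trim_arr_alt arr).head? = some "start" := by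
      rw [hB]
      simp only [dedupFrom]
      rw [if_neg (by simp)]
      rfl
    have hAv : trim_arr arr = dedupFrom (some "start") tt := by
      rw [hA, show dedupFrom (some "start") ("start" :: tt) = dedupFrom (some "start") tt from by
        simp [dedupFrom]]
      apply List.filter_eq_self.mpr
      intro x hx
      have hxarr : x ∈ arr := hsub x (List.mem_cons_of_mem _ (dedup_subset _ _ _ hx))
      simpa using (show x ≠ "repeat" from fun hc => hr (hc ▸ hxarr))
    have hne := head_dedup_ne tt "start"
    rw [← hAv, heq, hBhead] at hne
    exact hne rfl
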